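-- pv_equiv track=rewrite | github.com/Jesanchezz/API_Escala_Musical_Flask | musical_scale_module/MusicalScale.py | create_minor_scale
-- ===== SOURCE A (Python) =====
-- def create_minor_scale(accommodated_scale):
--     new_minor_scale =[]
--
--     for i in range(len(accommodated_scale)):
--         if i==0 or i==2:
--             new_minor_scale.append(accommodated_scale[i])
--         elif i%2!=0 and i>=3 and i<8:
--             new_minor_scale.append(accommodated_scale[i])
--         elif i%2==0 and i>=8:
--             new_minor_scale.append(accommodated_scale[i])
--
--     return new_minor_scale
-- ===== SOURCE B (Python) =====
-- def create_minor_scale(accommodated_scale):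
--     # tonic+mediant block, odd degrees 3..7, then every other note from 8 on
--     return (accommodated_scale[0:3:2]
--             + accommodated_scale[3:8:2]
--             + accommodated_scale[8::2])
-- ===== Notes on version B (the rewrite author's own statement) =====
-- stated objective: simpler
-- what changed: Replaced the index loop with its per-index elif chain by three stepped slices (xs[0:3:2] + xs[3:8:2] + xs[8::2]) that select exactly the same positions, removing all iteration and branching from the source.
import Mathlib
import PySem

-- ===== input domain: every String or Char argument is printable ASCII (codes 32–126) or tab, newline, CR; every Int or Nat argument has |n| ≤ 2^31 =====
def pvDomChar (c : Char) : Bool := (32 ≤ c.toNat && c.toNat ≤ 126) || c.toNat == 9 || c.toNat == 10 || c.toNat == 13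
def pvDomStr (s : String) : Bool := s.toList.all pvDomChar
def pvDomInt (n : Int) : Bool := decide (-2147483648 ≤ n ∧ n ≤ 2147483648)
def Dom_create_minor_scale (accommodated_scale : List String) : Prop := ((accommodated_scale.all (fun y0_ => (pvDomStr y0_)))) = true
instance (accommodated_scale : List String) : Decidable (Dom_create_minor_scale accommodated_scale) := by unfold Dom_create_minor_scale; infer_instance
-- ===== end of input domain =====

-- B replaces A's per-index loop with its three-way elif chain by three stepped slices that select the same positions (simpler).


-- ===== PORT A =====
-- literal transliteration: for i in range(len(xs)) with the three-way elif chain appending xs[i]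
def create_minor_scale (accommodated_scale : List String) : List String :=
  (PySem.List.pyRange 0 (PySem.List.len accommodated_scale) 1).foldl
    (fun new_minor_scale i =>
      if i = 0 ∨ i = 2 then
        new_minor_scale ++ [PySem.List.pyGetD accommodated_scale i ""]
      else if PySem.Int.mod i 2 ≠ 0 ∧ 3 ≤ i ∧ i < 8 then
        new_minor_scale ++ [PySem.List.pyGetD accommodated_scale i ""]
      else if PySem.Int.mod i 2 = 0 ∧ 8 ≤ i then
        new_minor_scale ++ [PySem.List.pyGetD accommodated_scale i ""]
      else new_minor_scale) []

-- ===== PORT B =====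
-- literal transliteration of Source B: xs[0:3:2] + xs[3:8:2] + xs[8::2]
def create_minor_scale_alt (accommodated_scale : List String) : List String :=
  (PySem.List.slice? accommodated_scale (some 0) (some 3) 2).getD []
    ++ (PySem.List.slice? accommodated_scale (some 3) (some 8) 2).getD []
    ++ (PySem.List.slice? accommodated_scale (some 8) none 2).getD []

-- ===== PRECONDITION & SPEC =====
def Spec_create_minor_scale (accommodated_scale : List String) (out : List String) : Prop := out = create_minor_scale_alt accommodated_scale
instance (accommodated_scale : List String) (out : List String) : Decidable (Spec_create_minor_scale accommodated_scale out) := by unfold Spec_create_minor_scale; infer_instance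

-- ===== CLAIM (what is proved, stated in full; the proofs are below) =====
def Claim_equal_create_minor_scale : Prop := ∀ (accommodated_scale : List String), Dom_create_minor_scale accommodated_scale → Spec_create_minor_scale accommodated_scale (create_minor_scale accommodated_scale)

-- ===== LEMMAS AND PROOFS =====

-- the Boolean index predicate A's branch chain realises, on Nat indices
def pvQ (i : Nat) : Bool :=
  decide (i = 0 ∨ i = 2 ∨ (i % 2 = 1 ∧ 3 ≤ i ∧ i < 8) ∨ (i % 2 = 0 ∧ 8 ≤ i))

-- the three index segments B's slices realise
def pvS1 (n : Nat) : List Nat := (List.range ((min 3 n + 1) / 2)).map (fun k => 2 * k)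
def pvS2 (n : Nat) : List Nat := (List.range ((min 8 n - min 3 n + 1) / 2)).map (fun k => min 3 n + 2 * k)
def pvS3 (n : Nat) : List Nat := (List.range ((n - min 8 n + 1) / 2)).map (fun k => min 8 n + 2 * k)

-- A's selected indices split into the three arithmetic segments
lemma pv_idx_split (n : Nat) :
    (List.range n).filter pvQ = pvS1 n ++ pvS2 n ++ pvS3 n := by
  induction n with
  | zero => decide
  | succ n ih =>
    by_cases h : n < 8
    · interval_cases n <;> decide
    · have h8 : 8 ≤ n := by omega
      rw [List.range_succ, List.filter_append, ih]
      have h1 : min 3 (n+1) = 3 := by omega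
      have h1' : min 3 n = 3 := by omega
      have h2 : min 8 (n+1) = 8 := by omega
      have h2' : min 8 n = 8 := by omega
      simp only [pvS1, pvS2, pvS3, h1, h1', h2, h2']
      by_cases he : n % 2 = 0
      · have hc : (n + 1 - 8 + 1) / 2 = (n - 8 + 1) / 2 + 1 := by omega
        have hq : pvQ n = true := by simp [pvQ]; omega
        rw [hc, List.filter_cons, hq]
        have hn : 8 + 2 * ((n - 8 + 1) / 2) = n := by omega
        simp [List.range_succ, hn]
      · have hc : (n + 1 - 8 + 1) / 2 = (n - 8 + 1) / 2 := by omega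
        have hq : pvQ n = false := by simp [pvQ]; omega
        rw [hc, List.filter_cons, hq]
        simp

-- A's loop is the filtered index map
lemma pvA_eq (xs : List String) :
    create_minor_scale xs = ((List.range xs.length).filter pvQ).map (fun j => xs.getD j "") := by
  unfold create_minor_scale
  have hfun : (fun (acc : List String) (i : Int) =>
      if i = 0 ∨ i = 2 then acc ++ [PySem.List.pyGetD xs i ""]
      else if PySem.Int.mod i 2 ≠ 0 ∧ 3 ≤ i ∧ i < 8 then acc ++ [PySem.List.pyGetD xs i ""]
      else if PySem.Int.mod i 2 = 0 ∧ 8 ≤ i then acc ++ [PySem.List.pyGetD xs i ""]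
      else acc)
      = (fun acc i => if (decide (i = 0 ∨ i = 2) || (decide (PySem.Int.mod i 2 ≠ 0 ∧ 3 ≤ i ∧ i < 8)) || decide (PySem.Int.mod i 2 = 0 ∧ 8 ≤ i)) then acc ++ [PySem.List.pyGetD xs i ""] else acc) := by
    funext acc i
    split_ifs <;> simp_all <;> omega
  rw [hfun, PySem.List.foldl_append_if, PySem.List.len_eq, PySem.List.pyRange_zero_natCast,
    List.filter_map, List.map_map, List.nil_append]
  congr 1
  · funext j
    simp [PySem.List.pyGetD_natCast]
  · apply List.filter_congr
    intro j hj
    rw [Bool.eq_iff_iff]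
    simp only [Function.comp_apply, pvQ, Bool.or_eq_true, decide_eq_true_eq,
      PySem.Int.mod_eq_emod_of_pos (show (0:Int) < 2 by norm_num)]
    omega

-- a step-2 filterMap over in-range indices is a plain map
lemma pv_fm (xs : List String) (s c : Nat) (h : ∀ k, k < c → s + 2 * k < xs.length) :
    (List.range c).filterMap (fun (k : Nat) => xs[((s : Int) + 2 * (k : Int)).toNat]?)
      = ((List.range c).map (fun k => s + 2 * k)).map (fun j => xs.getD j "") := by
  induction c with
  | zero => simp
  | succ c ih =>
    rw [List.range_succ, List.filterMap_append, List.map_append, List.map_append,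
      ih (fun k hk => h k (by omega))]
    have ht : ((s : Int) + 2 * (c : Int)).toNat = s + 2 * c := by omega
    have hlt : s + 2 * c < xs.length := h c (by omega)
    simp [ht, List.getD_eq_getElem?_getD, List.getElem?_eq_getElem hlt]

-- closed form of xs[a::2]
lemma pv_slice2_none (xs : List String) (a : Nat) :
    PySem.List.slice? xs (some (a : Int)) none 2
      = some (((List.range ((xs.length - min a xs.length + 1) / 2)).map
          (fun k => min a xs.length + 2 * k)).map (fun j => xs.getD j "")) := by
  simp only [PySem.List.slice?, PySem.List.sliceIndices]
  norm_num
  have ha : ¬((a : Int) < 0) := by omega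
  have hmin : min ((a : Int)) ((xs.length : Int)) = ((min a xs.length : Nat) : Int) := by omega
  simp only [if_neg ha, hmin]
  have hcnt : (if ((min a xs.length : Nat) : Int) < (xs.length : Int) then
      (((xs.length : Int) - ((min a xs.length : Nat) : Int) + 2 - 1) / 2).toNat else 0)
      = (xs.length - min a xs.length + 1) / 2 := by split_ifs with h <;> omega
  rw [hcnt, pv_fm xs (min a xs.length) _ (by intro k hk; omega)]
  simp [List.map_map, List.getD_eq_getElem?_getD]

-- closed form of xs[a:b:2]
lemma pv_slice2_some (xs : List String) (a b : Nat) :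
    PySem.List.slice? xs (some (a : Int)) (some (b : Int)) 2
      = some (((List.range ((min b xs.length - min a xs.length + 1) / 2)).map
          (fun k => min a xs.length + 2 * k)).map (fun j => xs.getD j "")) := by
  simp only [PySem.List.slice?, PySem.List.sliceIndices]
  norm_num
  have ha : ¬((a : Int) < 0) := by omega
  have hbneg : ¬((b : Int) < 0) := by omega
  have hmin : min ((a : Int)) ((xs.length : Int)) = ((min a xs.length : Nat) : Int) := by omega
  have hminb : min ((b : Int)) ((xs.length : Int)) = ((min b xs.length : Nat) : Int) := by omega
  simp only [if_neg ha, if_neg hbneg, hmin, hminb]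
  have hcnt : (if ((min a xs.length : Nat) : Int) < ((min b xs.length : Nat) : Int) then
      ((((min b xs.length : Nat) : Int) - ((min a xs.length : Nat) : Int) + 2 - 1) / 2).toNat else 0)
      = (min b xs.length - min a xs.length + 1) / 2 := by split_ifs with h <;> omega
  rw [hcnt, pv_fm xs (min a xs.length) _ (by intro k hk; omega)]
  simp [List.map_map, List.getD_eq_getElem?_getD]

-- B is the map over the three segments
lemma pvB_eq (xs : List String) :
    create_minor_scale_alt xs
      = (pvS1 xs.length ++ pvS2 xs.length ++ pvS3 xs.length).map (fun j => xs.getD j "") := by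
  have h1 := pv_slice2_some xs 0 3
  have h2 := pv_slice2_some xs 3 8
  have h3 := pv_slice2_none xs 8
  norm_num at h1 h2 h3
  unfold create_minor_scale_alt
  rw [h1, h2, h3]
  simp [pvS1, pvS2, pvS3, List.map_map, Function.comp]

-- ===== VERDICT (by name: the statement is the Claim_ definition above) =====
theorem create_minor_scale_spec : Claim_equal_create_minor_scale := by
  intro xs _
  show create_minor_scale xs = create_minor_scale_alt xs
  rw [pvA_eq, pvB_eq, pv_idx_split]
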